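-- pv_equiv track=rewrite | github.com/LLNL/csld | csld/util/mathtool.py | relativePosition1d
-- ===== SOURCE A (Python) =====
-- def allindex(value, inlist):
--     """
--     Mathematica Positions -equivalent
--     :param value:
--     :param inlist: list from which to find value
--     :return: all indices
--     """
--     # indices = []
--     # idx = -1
--     # while True:
--     #     try:
--     #         idx = qlist.index(value, idx+1)
--     #         indices.append(idx)
--     #     except ValueError:
--     #         break
--     # return indices
--     return [i for i, x in enumerate(inlist) if x == value]
--
-- def relativePosition1d(origMappedOne2One, final):
--     """
--     indexing function such that
--     map of pi(i) th element in original list = i-th list in transformed list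
--     :param origMappedOne2One:
--     :param final:
--     :return:
--     """
--     resl=[]
--     for i in final:
--         resl.append(allindex(i, origMappedOne2One))
--
--     for i in range(len(final)):
--         flag=len(resl[i])>1
--         resl[i]=resl[i][0]
--         if flag:
--             for j in range(i+1,len(final)):
--                 resl[j]= [x for  x in resl[j] if x != resl[i]]
--     return resl
-- ===== SOURCE B (Python) =====
-- def relativePosition1d(origMappedOne2One, final):
--     # value -> list of its positions in origMappedOne2One, built once
--     pos = {}
--     for i, x in enumerate(origMappedOne2One):
--         pos.setdefault(x, []).append(i)
--     cnt = {}
--     out = []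
--     for v in final:
--         idxs = pos[v]
--         t = cnt.get(v, 0)
--         out.append(idxs[min(t, len(idxs) - 1)])
--         cnt[v] = t + 1
--     return out
-- ===== Notes on version B (the rewrite author's own statement) =====
-- stated objective: faster
-- what changed: Replaces A's per-element full scan of orig plus quadratic duplicate-removal passes over later index lists by a value->positions dict built once and a per-value occurrence counter, emitting positions[v][min(count, len-1)] in one pass.
import Mathlib
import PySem

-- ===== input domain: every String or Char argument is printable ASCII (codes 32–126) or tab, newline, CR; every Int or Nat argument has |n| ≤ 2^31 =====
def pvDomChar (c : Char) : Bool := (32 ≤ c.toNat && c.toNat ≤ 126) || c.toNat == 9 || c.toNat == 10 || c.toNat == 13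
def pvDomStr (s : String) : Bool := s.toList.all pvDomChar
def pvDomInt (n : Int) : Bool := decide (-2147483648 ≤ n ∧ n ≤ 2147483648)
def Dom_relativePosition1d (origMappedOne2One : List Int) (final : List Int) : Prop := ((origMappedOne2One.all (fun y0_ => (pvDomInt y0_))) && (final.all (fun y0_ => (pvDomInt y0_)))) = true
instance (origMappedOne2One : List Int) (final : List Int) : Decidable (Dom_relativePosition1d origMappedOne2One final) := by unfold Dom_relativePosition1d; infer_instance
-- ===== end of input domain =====

-- B replaces A's per-element full scan of orig and quadratic duplicate-removal passes by a
-- value→positions dict built once plus a per-value occurrence counter (objective: faster, asymptotic).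
-- Pre_ excludes inputs where some final element does not occur in orig: there A raises IndexError
-- (resl[i][0] on an empty list) and B raises KeyError (pos[v]).

-- ===== PORT A =====
def allindexA (value : Int) (inlist : List Int) : List Int :=
  ((PySem.List.enumerate inlist).filter (fun p => p.2 == value)).map (fun p => p.1)

def loopA : List (List Int) → List Int
  | [] => []
  | l :: rest =>
    let flag := decide (1 < l.length)
    let h := (PySem.List.pyGet? l 0).getD 0
    h :: loopA (if flag then rest.map (fun lj => lj.filter (fun x => !(x == h))) else rest)
termination_by ls => ls.length
decreasing_by split <;> simp

def relativePosition1d (origMappedOne2One : List Int) (final : List Int) : List Int :=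
  loopA (final.map (fun v => allindexA v origMappedOne2One))

-- ===== PORT B =====
def buildPos (orig : List Int) : PySem.Dict Int (List Int) :=
  (PySem.List.enumerate orig).foldl (fun d p => d.modify p.2 [] (· ++ [p.1])) PySem.Dict.empty

def loopB (pos : PySem.Dict Int (List Int)) : List Int → PySem.Dict Int Int → List Int
  | [], _ => []
  | v :: rest, cnt =>
    let idxs := pos.getD v []
    let t := cnt.getD v 0
    ((PySem.List.pyGet? idxs (min t ((idxs.length : Int) - 1))).getD 0)
      :: loopB pos rest (cnt.insert v (t + 1))

def relativePosition1d_alt (origMappedOne2One : List Int) (final : List Int) : List Int :=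
  loopB (buildPos origMappedOne2One) final PySem.Dict.empty

-- ===== PRECONDITION & SPEC =====
-- Pre_ excludes exactly the inputs on which A raises IndexError (a final element absent from orig).
def Pre_relativePosition1d (origMappedOne2One : List Int) (final : List Int) : Prop :=
  ∀ v ∈ final, v ∈ origMappedOne2One
instance (origMappedOne2One : List Int) (final : List Int) : Decidable (Pre_relativePosition1d origMappedOne2One final) := by unfold Pre_relativePosition1d; infer_instance
def pvWitness_relativePosition1d : List Int × List Int := ([1, 2, 1, 3], [1, 1, 2, 1])

def Spec_relativePosition1d (origMappedOne2One : List Int) (final : List Int) (out : List Int) : Prop := out = relativePosition1d_alt origMappedOne2One final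
instance (origMappedOne2One : List Int) (final : List Int) (out : List Int) : Decidable (Spec_relativePosition1d origMappedOne2One final out) := by unfold Spec_relativePosition1d; infer_instance

-- ===== CLAIM (what is proved, stated in full; the proofs are below) =====
def Claim_equal_relativePosition1d : Prop := ∀ (origMappedOne2One : List Int) (final : List Int), Dom_relativePosition1d origMappedOne2One final → Pre_relativePosition1d origMappedOne2One final → Spec_relativePosition1d origMappedOne2One final (relativePosition1d origMappedOne2One final)

-- ===== LEMMAS AND PROOFS =====

theorem mem_allindexA {v : Int} {orig : List Int} {x : Int} :
    x ∈ allindexA v orig ↔ ∃ (k : Nat) (h : k < orig.length), x = (k : Int) ∧ orig[k] = v := by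
  simp only [allindexA, List.mem_map, List.mem_filter, PySem.List.mem_enumerate_iff]
  constructor
  · rintro ⟨p, ⟨⟨k, hk, rfl⟩, hv⟩, rfl⟩
    exact ⟨k, hk, by simp, by simpa using hv⟩
  · rintro ⟨k, hk, rfl, hv⟩
    exact ⟨((k : Int), orig[k]), ⟨⟨k, hk, by simp⟩, by simpa using hv⟩, rfl⟩

theorem pairwise_allindexA (v : Int) (orig : List Int) :
    (allindexA v orig).Pairwise (· < ·) := by
  unfold allindexA
  refine List.Pairwise.map _ (fun a b h => h) ?_
  exact (PySem.List.pairwise_lt_enumerate orig 0).filter _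

theorem nodup_allindexA (v : Int) (orig : List Int) : (allindexA v orig).Nodup :=
  (pairwise_allindexA v orig).imp (fun h => ne_of_lt h)

theorem disjoint_allindexA {v w : Int} {orig : List Int} {x : Int}
    (hv : x ∈ allindexA v orig) (hw : x ∈ allindexA w orig) : v = w := by
  obtain ⟨k, hk, rfl, hkv⟩ := mem_allindexA.mp hv
  obtain ⟨k', hk', he, hkw⟩ := mem_allindexA.mp hw
  have : k' = k := by omega
  subst this; omega

theorem ne_nil_allindexA {v : Int} {orig : List Int} (h : v ∈ orig) :
    allindexA v orig ≠ [] := by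
  obtain ⟨k, hk, rfl⟩ := List.mem_iff_getElem.mp h
  have : (k : Int) ∈ allindexA orig[k] orig := mem_allindexA.mpr ⟨k, hk, rfl, rfl⟩
  exact List.ne_nil_of_mem this

theorem getD_buildPos (orig : List Int) (v : Int) :
    (buildPos orig).getD v [] = allindexA v orig := by
  unfold buildPos allindexA
  have hswap : PySem.List.enumerate orig 0
      = ((PySem.List.enumerate orig 0).map (fun p => (p.2, p.1))).map (fun q => (q.2, q.1)) := by
    simp [Function.comp_def]
  rw [hswap, List.foldl_map, PySem.Dict.getD_foldl_modify_append]
  simp [List.filter_map, Function.comp_def]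

-- the per-value state the A-side loop maintains: the position list with the served prefix dropped
def dropState (orig : List Int) (cnt : PySem.Dict Int Int) (v : Int) : List Int :=
  (allindexA v orig).drop (min (cnt.getD v 0).toNat ((allindexA v orig).length - 1))

theorem loopA_eq_loopB (orig : List Int) (rest : List Int) (cnt : PySem.Dict Int Int)
    (hmem : ∀ v ∈ rest, v ∈ orig) (hpos : ∀ v, 0 ≤ cnt.getD v 0) :
    loopA (rest.map (dropState orig cnt)) = loopB (buildPos orig) rest cnt := by
  induction rest generalizing cnt with
  | nil => simp [loopA, loopB]
  | cons v rest ih =>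
    have hv : v ∈ orig := hmem v (by simp)
    set L := allindexA v orig with hL
    have hLne : L ≠ [] := ne_nil_allindexA hv
    have hm : 1 ≤ L.length := List.length_pos_iff.mpr hLne
    set t : Int := cnt.getD v 0 with ht
    have ht0 : 0 ≤ t := hpos v
    set d : Nat := min t.toNat (L.length - 1) with hd
    have hdlt : d < L.length := by omega
    have hdrop : L.drop d = L[d] :: L.drop (d + 1) := List.drop_eq_getElem_cons hdlt
    -- the head both loops produce
    have hheadA : (PySem.List.pyGet? (L.drop d) 0).getD 0 = L[d] := by
      rw [hdrop, show (0 : Int) = ((0 : Nat) : Int) from rfl, PySem.List.pyGet?_natCast]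
      simp [List.getElem?_eq_getElem hdlt]
    have hheadB :
        (PySem.List.pyGet? ((buildPos orig).getD v [])
            (min t (((buildPos orig).getD v []).length - 1))).getD 0 = L[d] := by
      rw [getD_buildPos, ← hL]
      have hmin : (min t ((L.length : Int) - 1)) = (d : Int) := by omega
      rw [hmin, PySem.List.pyGet?_natCast]
      simp [List.getElem?_eq_getElem hdlt]
    have hcnt' : ∀ w, 0 ≤ (cnt.insert v (t + 1)).getD w 0 := by
      intro w
      rcases eq_or_ne w v with heq | hne
      · subst heq; rw [PySem.Dict.getD_insert_self]; omega
      · rw [PySem.Dict.getD_insert_of_ne _ _ _ hne]; exact hpos w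
    have hdsv : dropState orig cnt v = L.drop d := by unfold dropState; rw [← hL, ← ht, ← hd]
    -- new state equals dropState with the bumped counter
    have hnext : (if decide (1 < (L.drop d).length) = true
          then (rest.map (dropState orig cnt)).map (fun lj => lj.filter (fun x => !(x == L[d])))
          else rest.map (dropState orig cnt))
        = rest.map (dropState orig (cnt.insert v (t + 1))) := by
      by_cases hflag : 1 < (L.drop d).length
      · -- the value occurs again later: filtering strips exactly the served index
        rw [List.length_drop] at hflag
        have hdt : d = t.toNat := by omega
        have hnod : (L.drop d).Nodup := (List.drop_sublist _ _).nodup (nodup_allindexA v orig)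
        rw [hdrop] at hnod
        have hnotmem : L[d] ∉ L.drop (d + 1) := (List.nodup_cons.mp hnod).1
        have h2 : (L.drop (d + 1)).filter (fun x => !(x == L[d])) = L.drop (d + 1) := by
          apply List.filter_eq_self.mpr
          intro a ha
          simp only [Bool.not_eq_eq_eq_not, Bool.not_true, beq_eq_false_iff_ne]
          exact fun he => hnotmem (he ▸ ha)
        have hmin' : min (t + 1).toNat (L.length - 1) = d + 1 := by omega
        simp only [List.length_drop, hflag, decide_true, if_true, List.map_map]
        apply List.map_congr_left
        intro w hw
        simp only [Function.comp_apply]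
        rcases eq_or_ne w v with heq | hne
        · subst heq
          rw [hdsv]
          unfold dropState
          rw [PySem.Dict.getD_insert_self, ← hL, hmin', hdrop, List.filter_cons]
          simp [h2]
        · -- other values: the served index never occurs in their lists
          unfold dropState
          rw [PySem.Dict.getD_insert_of_ne _ _ _ hne]
          apply List.filter_eq_self.mpr
          intro a ha
          have haL : a ∈ allindexA w orig := List.mem_of_mem_drop ha
          simp only [Bool.not_eq_eq_eq_not, Bool.not_true, beq_eq_false_iff_ne]
          intro he
          subst he
          exact hne (disjoint_allindexA haL
            (List.mem_of_mem_drop (hdrop ▸ List.mem_cons_self)))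
      · -- the list is exhausted: state unchanged, the counter bump is absorbed by the min
        rw [List.length_drop] at hflag
        simp only [List.length_drop, hflag, decide_false]
        apply List.map_congr_left
        intro w hw
        rcases eq_or_ne w v with heq | hne
        · subst heq
          unfold dropState
          rw [PySem.Dict.getD_insert_self, ← hL]
          have : min (t + 1).toNat (L.length - 1) = min t.toNat (L.length - 1) := by omega
          rw [this, ← ht, ← hd]
        · unfold dropState
          rw [PySem.Dict.getD_insert_of_ne _ _ _ hne]
    rw [List.map_cons]
    simp only [loopA, loopB]
    rw [hdsv, hheadA, hheadB]
    congr 1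
    rw [hnext]
    exact ih _ (fun w hw => hmem w (List.mem_cons_of_mem _ hw)) hcnt'

-- ===== VERDICT (by name: the statement is the Claim_ definition above) =====
theorem relativePosition1d_spec : Claim_equal_relativePosition1d := by
  intro orig final _ hpre
  unfold Spec_relativePosition1d relativePosition1d relativePosition1d_alt
  have h := loopA_eq_loopB orig final PySem.Dict.empty hpre
    (by intro v; simp [PySem.Dict.getD, PySem.Dict.get?, PySem.Dict.empty])
  rw [← h]
  have hmap : final.map (dropState orig PySem.Dict.empty)
      = final.map (fun v => allindexA v orig) := by
    apply List.map_congr_left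
    intro v hv
    simp [dropState, PySem.Dict.getD, PySem.Dict.get?, PySem.Dict.empty]
  rw [← hmap]
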